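-- pv_equiv track=rewrite | github.com/syazra/prak-daspro | Hackerrank/8/8B1_Perang Harta.py | Nilai2
-- ===== SOURCE A (Python) =====
-- def Konso(e,S):
--     return [e] + S
--
-- def FirstElmt(S):
--     return S[0]
--
-- def Tail(S):
--     return S[1:]
--
-- def IsEmpty(S):
--     return S == []
--
-- def IsMember(x, L):
--     if IsEmpty(L):
--         return False
--     else:
--         return IsMember(x, Tail(L)) or FirstElmt(L) == x
--
-- def Rember(x, L):
--     if IsEmpty(L):
--         return []
--     else:
--         if FirstElmt(L) == x:
--             return Tail(L)
--         else:
--             return Konso(FirstElmt(L), Rember(x, Tail(L)))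
--
-- def Nilai2(S1, S2):
--     if IsEmpty(S1):
--         return 0
--     else:
--         if IsMember(FirstElmt(S1), S2):
--             if IsMember(FirstElmt(S2), S1):
--                 return Nilai2(Rember(FirstElmt(S2), S1), Tail(S2))
--             else:
--                 return 2 + Nilai2(Tail(S1), Rember(FirstElmt(S1), Tail(S2)))
--         else:
--             return 1 + Nilai2(Tail(S1), Tail(S2))
-- ===== SOURCE B (Python) =====
-- def Nilai2(S1, S2):
--     # One pass with index pointers and counters: live-multiset counts give O(1)
--     # membership, pending-skip counters give O(1) first-occurrence removal.
--     c1 = {}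
--     for v in S1:
--         c1[v] = c1.get(v, 0) + 1
--     c2 = {}
--     for v in S2:
--         c2[v] = c2.get(v, 0) + 1
--     skip1 = {}
--     skip2 = {}
--     i, j = 0, 0
--     n, m = len(S1), len(S2)
--     score = 0
--     while True:
--         while i < n and skip1.get(S1[i], 0) > 0:
--             skip1[S1[i]] -= 1
--             i += 1
--         if i >= n:
--             return score
--         while j < m and skip2.get(S2[j], 0) > 0:
--             skip2[S2[j]] -= 1
--             j += 1
--         x = S1[i]
--         if c2.get(x, 0) > 0:
--             y = S2[j]
--             if c1.get(y, 0) > 0: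
--                 # drop head of S2, remove first occurrence of y from S1
--                 c2[y] -= 1
--                 j += 1
--                 c1[y] -= 1
--                 if y == x:
--                     i += 1
--                 else:
--                     skip1[y] = skip1.get(y, 0) + 1
--             else:
--                 # score 2: drop head of S1, drop head of S2, remove first x from rest of S2
--                 score += 2
--                 c1[x] -= 1
--                 i += 1
--                 c2[y] -= 1
--                 j += 1
--                 c2[x] -= 1
--                 skip2[x] = skip2.get(x, 0) + 1
--         else:
--             # score 1: drop head of S1 and head of S2 (if any)
--             score += 1
--             c1[x] -= 1
--             i += 1
--             if j < m:
--                 c2[S2[j]] -= 1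
--                 j += 1
-- ===== Notes on version B (the rewrite author's own statement) =====
-- stated objective: faster
-- what changed: Replaced A's recursive list rebuilding (O(n) IsMember scans and O(n) Rember copies per round) by a single loop over index pointers with live-multiset counters for O(1) membership tests and pending-skip counters that make first-occurrence removal O(1) amortized.
import Mathlib
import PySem

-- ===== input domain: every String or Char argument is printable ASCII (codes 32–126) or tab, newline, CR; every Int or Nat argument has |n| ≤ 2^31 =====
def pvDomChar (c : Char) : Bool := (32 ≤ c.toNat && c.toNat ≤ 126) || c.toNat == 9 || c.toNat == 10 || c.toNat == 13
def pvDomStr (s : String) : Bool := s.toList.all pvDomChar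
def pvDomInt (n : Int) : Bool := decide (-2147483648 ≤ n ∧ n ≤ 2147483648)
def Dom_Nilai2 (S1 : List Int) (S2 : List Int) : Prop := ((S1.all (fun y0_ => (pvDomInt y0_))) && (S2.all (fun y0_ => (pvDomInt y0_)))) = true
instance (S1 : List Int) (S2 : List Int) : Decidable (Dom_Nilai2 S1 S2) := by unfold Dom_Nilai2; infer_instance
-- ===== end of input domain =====

-- B replaces A's recursive list surgery by a single pass with index pointers,
-- live-multiset counters (O(1) membership) and pending-skip counters
-- (O(1) first-occurrence removal); objective: faster.

-- ===== PORT A =====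
def pyIsMember (x : Int) (L : List Int) : Bool :=
  match L with
  | [] => false
  | h :: t => pyIsMember x t || (h == x)

def pyRember (x : Int) (L : List Int) : List Int :=
  match L with
  | [] => []
  | h :: t => if h == x then t else h :: pyRember x t

-- used only by Nilai2's decreasing_by
theorem pyRember_length_le (x : Int) (L : List Int) : (pyRember x L).length ≤ L.length := by
  induction L with
  | nil => simp [pyRember]
  | cons h t ih =>
    simp only [pyRember]
    split
    · simp
    · simpa using Nat.succ_le_succ ih

theorem nilai2_dec1 (x : Int) (t1 : List Int) :
    t1.length + ([] : List Int).length < (x :: t1).length + ([] : List Int).length := by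
  simp

theorem nilai2_dec2 (y x : Int) (t1 t2 : List Int) :
    (pyRember y (x :: t1)).length + t2.length < (x :: t1).length + (y :: t2).length := by
  have := pyRember_length_le y (x :: t1)
  simp at this ⊢
  omega

theorem nilai2_dec3 (x y : Int) (t1 t2 : List Int) :
    t1.length + (pyRember x t2).length < (x :: t1).length + (y :: t2).length := by
  have := pyRember_length_le x t2
  simp
  omega

theorem nilai2_dec4 (x y : Int) (t1 t2 : List Int) :
    t1.length + t2.length < (x :: t1).length + (y :: t2).length := by
  simp only [List.length_cons]
  omega

def Nilai2 (S1 : List Int) (S2 : List Int) : Int :=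
  match S1 with
  | [] => 0
  | x :: t1 =>
    match S2 with
    | [] => 1 + Nilai2 t1 []      -- IsMember(x, []) is False; Tail([]) = []
    | y :: t2 =>
      if pyIsMember x (y :: t2) then
        if pyIsMember y (x :: t1) then
          Nilai2 (pyRember y (x :: t1)) t2
        else
          2 + Nilai2 t1 (pyRember x t2)
      else
        1 + Nilai2 t1 t2
termination_by S1.length + S2.length
decreasing_by
  · exact nilai2_dec1 x t1
  · exact nilai2_dec2 y x t1 t2
  · exact nilai2_dec3 x y t1 t2
  · exact nilai2_dec4 x y t1 t2

-- ===== PORT B =====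
-- used only by pvSkipLoop's decreasing_by
theorem pvNat_dec {n i : Nat} (h : i < n) : n - (i + 1) < n - i := by omega

-- the two inner `while` loops of Source B that advance a pointer past pending skips
def pvSkipLoop (arr : List Int) (skip : PySem.Dict Int Int) (i : Nat) :
    PySem.Dict Int Int × Nat :=
  if h : i < arr.length then
    if hs : 0 < skip.getD (arr.getD i 0) 0 then
      pvSkipLoop arr (skip.insert (arr.getD i 0) (skip.getD (arr.getD i 0) 0 - 1)) (i + 1)
    else (skip, i)
  else (skip, i)
termination_by arr.length - i
decreasing_by exact pvNat_dec h

theorem pvLoop_decA (n m i j i' j' : Nat) (g1 : i ≤ i') (g2 : j ≤ j')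
    (h1 : i' < n) (h2 : j' < m) :
    n - (i' + 1) + (m - (j' + 1)) < n - i + (m - j) := by omega

theorem pvLoop_decB (n m i j i' j' : Nat) (g1 : i ≤ i') (g2 : j ≤ j')
    (h2 : j' < m) : n - i' + (m - (j' + 1)) < n - i + (m - j) := by omega

theorem pvLoop_decC (n m i j i' j' : Nat) (g1 : i ≤ i') (g2 : j ≤ j')
    (h1 : i' < n) : n - (i' + 1) + (m - j') < n - i + (m - j) := by omega

-- used only by pvLoop's decreasing_by
theorem pvSkipLoop_ge (arr : List Int) (skip : PySem.Dict Int Int) (i : Nat) :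
    i ≤ (pvSkipLoop arr skip i).2 := by
  fun_induction pvSkipLoop arr skip i with
  | case1 _ _ _ _ ih => omega
  | case2 => simp
  | case3 => simp

-- the `while True` loop of Source B
def pvLoop (a1 a2 : List Int) (c1 c2 skip1 skip2 : PySem.Dict Int Int)
    (i j : Nat) (score : Int) : Int :=
  let p1 := pvSkipLoop a1 skip1 i
  if h1 : p1.2 < a1.length then
    let p2 := pvSkipLoop a2 skip2 j
    let x := a1.getD p1.2 0
    if 0 < c2.getD x 0 then
      if h2 : p2.2 < a2.length then   -- totality guard: x is in the live S2, which is then nonempty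
        let y := a2.getD p2.2 0
        if 0 < c1.getD y 0 then
          let c1' := c1.insert y (c1.getD y 0 - 1)
          let c2' := c2.insert y (c2.getD y 0 - 1)
          if y = x then
            pvLoop a1 a2 c1' c2' p1.1 p2.1 (p1.2 + 1) (p2.2 + 1) score
          else
            pvLoop a1 a2 c1' c2' (p1.1.insert y (p1.1.getD y 0 + 1)) p2.1
              p1.2 (p2.2 + 1) score
        else
          let c1' := c1.insert x (c1.getD x 0 - 1)
          let c2' := c2.insert y (c2.getD y 0 - 1)
          let c2'' := c2'.insert x (c2'.getD x 0 - 1)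
          pvLoop a1 a2 c1' c2'' p1.1 (p2.1.insert x (p2.1.getD x 0 + 1))
            (p1.2 + 1) (p2.2 + 1) (score + 2)
      else score
    else
      if h2 : p2.2 < a2.length then
        pvLoop a1 a2 (c1.insert x (c1.getD x 0 - 1))
          (c2.insert (a2.getD p2.2 0) (c2.getD (a2.getD p2.2 0) 0 - 1)) p1.1 p2.1
          (p1.2 + 1) (p2.2 + 1) (score + 1)
      else
        pvLoop a1 a2 (c1.insert x (c1.getD x 0 - 1)) c2 p1.1 p2.1
          (p1.2 + 1) p2.2 (score + 1)
  else score
termination_by (a1.length - i) + (a2.length - j)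
decreasing_by
  · exact pvLoop_decA _ _ _ _ _ _ (pvSkipLoop_ge a1 skip1 i) (pvSkipLoop_ge a2 skip2 j) h1 h2
  · exact pvLoop_decB _ _ _ _ _ _ (pvSkipLoop_ge a1 skip1 i) (pvSkipLoop_ge a2 skip2 j) h2
  · exact pvLoop_decA _ _ _ _ _ _ (pvSkipLoop_ge a1 skip1 i) (pvSkipLoop_ge a2 skip2 j) h1 h2
  · exact pvLoop_decA _ _ _ _ _ _ (pvSkipLoop_ge a1 skip1 i) (pvSkipLoop_ge a2 skip2 j) h1 h2
  · exact pvLoop_decC _ _ _ _ _ _ (pvSkipLoop_ge a1 skip1 i) (pvSkipLoop_ge a2 skip2 j) h1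

def Nilai2_alt (S1 : List Int) (S2 : List Int) : Int :=
  let c1 := S1.foldl (fun d v => d.insert v (d.getD v 0 + 1)) PySem.Dict.empty
  let c2 := S2.foldl (fun d v => d.insert v (d.getD v 0 + 1)) PySem.Dict.empty
  pvLoop S1 S2 c1 c2 PySem.Dict.empty PySem.Dict.empty 0 0 0


-- ===== PRECONDITION & SPEC =====
def Spec_Nilai2 (S1 : List Int) (S2 : List Int) (out : Int) : Prop := out = Nilai2_alt S1 S2
instance (S1 : List Int) (S2 : List Int) (out : Int) : Decidable (Spec_Nilai2 S1 S2 out) := by unfold Spec_Nilai2; infer_instance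

-- ===== CLAIM (what is proved, stated in full; the proofs are below) =====
def Claim_equal_Nilai2 : Prop := ∀ (S1 : List Int) (S2 : List Int), Dom_Nilai2 S1 S2 → Spec_Nilai2 S1 S2 (Nilai2 S1 S2)

-- ===== LEMMAS AND PROOFS =====

theorem Nilai2_nil (L : List Int) : Nilai2 [] L = 0 := by
  rw [Nilai2.eq_def]

theorem Nilai2_cons_nil (x : Int) (t1 : List Int) : Nilai2 (x :: t1) [] = 1 + Nilai2 t1 [] := by
  rw [Nilai2.eq_def]

theorem Nilai2_cons_cons (x y : Int) (t1 t2 : List Int) :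
    Nilai2 (x :: t1) (y :: t2) =
      if pyIsMember x (y :: t2) then
        if pyIsMember y (x :: t1) then Nilai2 (pyRember y (x :: t1)) t2
        else 2 + Nilai2 t1 (pyRember x t2)
      else 1 + Nilai2 t1 t2 := by
  rw [Nilai2.eq_def]

-- abstraction: the "live" list represented by a suffix together with pending skip counts
def liveList (s : PySem.Dict Int Int) (L : List Int) : List Int :=
  match L with
  | [] => []
  | h :: t =>
    if 0 < s.getD h 0 then liveList (s.insert h (s.getD h 0 - 1)) t
    else h :: liveList s t

theorem liveList_congr (s s' : PySem.Dict Int Int) (L : List Int)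
    (h : ∀ k, s.getD k 0 = s'.getD k 0) : liveList s L = liveList s' L := by
  induction L generalizing s s' with
  | nil => rfl
  | cons a t ih =>
    rw [liveList, liveList, h a]
    split_ifs with hp
    · refine ih _ _ (fun k => ?_)
      rw [PySem.Dict.getD_insert, PySem.Dict.getD_insert]
      split_ifs with hk
      · rfl
      · exact h k
    · rw [ih _ _ h]

theorem liveList_empty (L : List Int) : liveList PySem.Dict.empty L = L := by
  induction L with
  | nil => rfl
  | cons a t ih => simp [liveList, PySem.Dict.getD_empty, ih]

theorem pvSkipLoop_live (arr : List Int) (skip : PySem.Dict Int Int) (i : Nat) :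
    liveList (pvSkipLoop arr skip i).1 (arr.drop (pvSkipLoop arr skip i).2)
      = liveList skip (arr.drop i) := by
  fun_induction pvSkipLoop arr skip i with
  | case1 skip i h hs ih =>
    have hd : arr.drop i = arr.getD i 0 :: arr.drop (i + 1) := by
      rw [List.getD_eq_getElem _ _ h, List.drop_eq_getElem_cons h]
    rw [ih, hd, liveList, if_pos hs]
  | case2 => rfl
  | case3 => rfl

theorem pvSkipLoop_stop (arr : List Int) (skip : PySem.Dict Int Int) (i : Nat)
    (h : (pvSkipLoop arr skip i).2 < arr.length) :
    ¬ 0 < (pvSkipLoop arr skip i).1.getD (arr.getD (pvSkipLoop arr skip i).2 0) 0 := by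
  fun_induction pvSkipLoop arr skip i with
  | case1 skip i h1 hs ih => exact ih h
  | case2 skip i h1 hs => exact hs
  | case3 skip i h1 => exact absurd h h1

theorem pvSkipLoop_nonneg (arr : List Int) (skip : PySem.Dict Int Int) (i : Nat)
    (h : ∀ v, 0 ≤ skip.getD v 0) : ∀ v, 0 ≤ (pvSkipLoop arr skip i).1.getD v 0 := by
  fun_induction pvSkipLoop arr skip i with
  | case1 skip i h1 hs ih =>
    refine ih (fun v => ?_)
    rw [PySem.Dict.getD_insert]
    split_ifs
    · omega
    · exact h v
  | case2 skip i h1 hs => exact h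
  | case3 skip i h1 => exact h

theorem pyIsMember_iff (x : Int) (L : List Int) : pyIsMember x L = true ↔ x ∈ L := by
  induction L with
  | nil => simp [pyIsMember]
  | cons h t ih =>
    simp only [pyIsMember, Bool.or_eq_true, beq_iff_eq, ih, List.mem_cons]
    constructor
    · rintro (hm | rfl)
      · exact Or.inr hm
      · exact Or.inl rfl
    · rintro (rfl | hm)
      · exact Or.inr rfl
      · exact Or.inl hm

theorem count_pyRember (y v : Int) (M : List Int) (hm : y ∈ M) :
    ((pyRember y M).count v : Int) = (M.count v : Int) - (if v = y then 1 else 0) := by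
  induction M with
  | nil => cases hm
  | cons h t ih =>
    rw [pyRember]
    by_cases hy : h = y
    · subst hy
      rw [if_pos (by simp), List.count_cons]
      push_cast
      by_cases hv : v = h
      · simp [hv]
      · simp [hv, Ne.symm hv]
    · have hm' : y ∈ t := by
        rcases List.mem_cons.mp hm with he | hm'
        · exact absurd he.symm hy
        · exact hm'
      rw [if_neg (by simpa using hy), List.count_cons, List.count_cons]
      have hih := ih hm'
      push_cast
      by_cases h1 : v = h <;> by_cases h2 : v = y <;> simp [h1, h2] at hih ⊢ <;> omega

-- Rember on a live list = bump the pending-skip count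
theorem liveList_rember (s : PySem.Dict Int Int) (L : List Int) (y : Int)
    (hnn : ∀ v, 0 ≤ s.getD v 0) (hmem : y ∈ liveList s L) :
    liveList (s.insert y (s.getD y 0 + 1)) L = pyRember y (liveList s L) := by
  induction L generalizing s with
  | nil => cases hmem
  | cons h t ih =>
    by_cases hpos : 0 < s.getD h 0
    · have hpos' : 0 < (s.insert y (s.getD y 0 + 1)).getD h 0 := by
        rw [PySem.Dict.getD_insert]
        split_ifs with hk
        · have := hnn y; omega
        · exact hpos
      rw [liveList, if_pos hpos']
      rw [liveList, if_pos hpos] at hmem ⊢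
      have hnn0 : ∀ v, 0 ≤ (s.insert h (s.getD h 0 - 1)).getD v 0 := by
        intro v; rw [PySem.Dict.getD_insert]; split_ifs
        · omega
        · exact hnn v
      rw [← ih (s.insert h (s.getD h 0 - 1)) hnn0 hmem]
      apply liveList_congr
      intro k
      simp only [PySem.Dict.getD_insert]
      by_cases hky : k = y <;> by_cases hkh : k = h <;> by_cases hhy : h = y <;>
        simp_all <;> omega
    · have hgh : s.getD h 0 = 0 := le_antisymm (by omega) (hnn h)
      by_cases hhy : h = y
      · subst hhy
        have h1 : 0 < (s.insert h (s.getD h 0 + 1)).getD h 0 := by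
          rw [PySem.Dict.getD_insert_self]; omega
        rw [liveList, if_pos h1, PySem.Dict.getD_insert_self]
        rw [liveList, if_neg hpos]
        simp only [pyRember, beq_self_eq_true, if_true]
        apply liveList_congr
        intro k
        simp only [PySem.Dict.getD_insert]
        split_ifs with hk
        · subst hk; omega
        · rfl
      · have h2 : ¬ 0 < (s.insert y (s.getD y 0 + 1)).getD h 0 := by
          rw [PySem.Dict.getD_insert_of_ne _ _ _ hhy]; omega
        rw [liveList, if_neg h2]
        rw [liveList, if_neg hpos] at hmem ⊢
        have hmem' : y ∈ liveList s t := by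
          rcases List.mem_cons.mp hmem with he | hm
          · exact absurd he.symm hhy
          · exact hm
        simp [pyRember, hhy, ih s hnn hmem']

-- head decomposition of a live list at a stopped pointer
theorem liveList_head (arr : List Int) (s : PySem.Dict Int Int) (i : Nat)
    (hi : i < arr.length) (hstop : ¬ 0 < s.getD (arr.getD i 0) 0) :
    liveList s (arr.drop i) = arr.getD i 0 :: liveList s (arr.drop (i + 1)) := by
  have hd : arr.drop i = arr.getD i 0 :: arr.drop (i + 1) := by
    rw [List.getD_eq_getElem _ _ hi, List.drop_eq_getElem_cons hi]
  rw [hd, liveList, if_neg hstop]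

-- counter update lemmas: decrementing tracks Rember / Tail on the counted list
theorem counter_rember (c : PySem.Dict Int Int) (y : Int) (M : List Int)
    (hc : ∀ v, c.getD v 0 = (M.count v : Int)) (hm : y ∈ M) :
    ∀ v, (c.insert y (c.getD y 0 - 1)).getD v 0 = ((pyRember y M).count v : Int) := by
  intro v
  rw [PySem.Dict.getD_insert, count_pyRember y v M hm]
  split_ifs with hvy
  · rw [hvy, hc y]
  · rw [hc v]; omega

theorem counter_tail (c : PySem.Dict Int Int) (h : Int) (T : List Int)
    (hc : ∀ v, c.getD v 0 = (((h :: T).count v : Int))) :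
    ∀ v, (c.insert h (c.getD h 0 - 1)).getD v 0 = (T.count v : Int) := by
  have := counter_rember c h (h :: T) hc (List.mem_cons_self)
  simpa [pyRember] using this

theorem count_zero_not_mem (c : PySem.Dict Int Int) (M : List Int) (x : Int)
    (hc : ∀ v, c.getD v 0 = (M.count v : Int)) (hx : ¬ 0 < c.getD x 0) : x ∉ M := by
  have := hc x
  rw [this] at hx
  intro hmem
  have : 0 < M.count x := List.count_pos_iff.mpr hmem
  omega

theorem count_pos_mem (c : PySem.Dict Int Int) (M : List Int) (x : Int)
    (hc : ∀ v, c.getD v 0 = (M.count v : Int)) (hx : 0 < c.getD x 0) : x ∈ M := by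
  have := hc x
  rw [this] at hx
  exact List.count_pos_iff.mp (by exact_mod_cast hx)

-- the main simulation lemma: pvLoop computes score plus Nilai2 of the two live lists
theorem pvLoop_eq (a1 a2 : List Int) (N : Nat) :
    ∀ (c1 c2 s1 s2 : PySem.Dict Int Int) (i j : Nat) (score : Int),
      (a1.length - i) + (a2.length - j) ≤ N →
      (∀ v, 0 ≤ s1.getD v 0) → (∀ v, 0 ≤ s2.getD v 0) →
      (∀ v, c1.getD v 0 = ((liveList s1 (a1.drop i)).count v : Int)) →
      (∀ v, c2.getD v 0 = ((liveList s2 (a2.drop j)).count v : Int)) →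
      pvLoop a1 a2 c1 c2 s1 s2 i j score
        = score + Nilai2 (liveList s1 (a1.drop i)) (liveList s2 (a2.drop j)) := by
  induction N with
  | zero =>
    intro c1 c2 s1 s2 i j score hN hnn1 hnn2 hc1 hc2
    have hi : a1.length ≤ i := by omega
    have hdi : a1.drop i = [] := List.drop_eq_nil_of_le hi
    have h1 : ¬ (pvSkipLoop a1 s1 i).2 < a1.length := by
      have := pvSkipLoop_ge a1 s1 i; omega
    rw [pvLoop]
    dsimp only
    rw [dif_neg h1, hdi, liveList, Nilai2_nil]
    ring
  | succ N ih =>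
    intro c1 c2 s1 s2 i j score hN hnn1 hnn2 hc1 hc2
    obtain ⟨⟨s1', i'⟩, hq1⟩ : ∃ p, pvSkipLoop a1 s1 i = p := ⟨_, rfl⟩
    obtain ⟨⟨s2', j'⟩, hq2⟩ : ∃ p, pvSkipLoop a2 s2 j = p := ⟨_, rfl⟩
    have g1 := pvSkipLoop_ge a1 s1 i
    have g2 := pvSkipLoop_ge a2 s2 j
    have hL1 := pvSkipLoop_live a1 s1 i
    have hL2 := pvSkipLoop_live a2 s2 j
    have hnn1' := pvSkipLoop_nonneg a1 s1 i hnn1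
    have hnn2' := pvSkipLoop_nonneg a2 s2 j hnn2
    rw [hq1] at g1 hL1 hnn1'
    rw [hq2] at g2 hL2 hnn2'
    dsimp only at g1 g2 hL1 hL2 hnn1' hnn2'
    have hc1' : ∀ v, c1.getD v 0 = ((liveList s1' (a1.drop i')).count v : Int) := by
      intro v; rw [hc1 v, hL1]
    have hc2' : ∀ v, c2.getD v 0 = ((liveList s2' (a2.drop j')).count v : Int) := by
      intro v; rw [hc2 v, hL2]
    rw [pvLoop]
    dsimp only
    rw [hq1, hq2, ← hL1, ← hL2]
    dsimp only
    by_cases h1 : i' < a1.length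
    · rw [dif_pos h1]
      have hx0 := pvSkipLoop_stop a1 s1 i (by rw [hq1]; exact h1)
      rw [hq1] at hx0
      dsimp only at hx0
      have hhead1 : liveList s1' (a1.drop i')
          = a1.getD i' 0 :: liveList s1' (a1.drop (i' + 1)) :=
        liveList_head a1 s1' i' h1 hx0
      have hc1x : ∀ v, c1.getD v 0
          = (((a1.getD i' 0 :: liveList s1' (a1.drop (i' + 1))).count v : Int)) := by
        intro v; rw [hc1' v, hhead1]
      by_cases hx : 0 < c2.getD (a1.getD i' 0) 0
      · rw [if_pos hx]
        have hxmem : a1.getD i' 0 ∈ liveList s2' (a2.drop j') :=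
          count_pos_mem c2 _ _ hc2' hx
        have h2 : j' < a2.length := by
          by_contra h2
          rw [List.drop_eq_nil_of_le (by omega)] at hxmem
          cases hxmem
        rw [dif_pos h2]
        have hy0 := pvSkipLoop_stop a2 s2 j (by rw [hq2]; exact h2)
        rw [hq2] at hy0
        dsimp only at hy0
        have hhead2 : liveList s2' (a2.drop j')
            = a2.getD j' 0 :: liveList s2' (a2.drop (j' + 1)) :=
          liveList_head a2 s2' j' h2 hy0
        have hc2y : ∀ v, c2.getD v 0
            = (((a2.getD j' 0 :: liveList s2' (a2.drop (j' + 1))).count v : Int)) := by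
          intro v; rw [hc2' v, hhead2]
        rw [hhead1, hhead2]
        rw [hhead2] at hxmem
        have hAmem1 : pyIsMember (a1.getD i' 0)
            (a2.getD j' 0 :: liveList s2' (a2.drop (j' + 1))) = true :=
          (pyIsMember_iff _ _).mpr hxmem
        rw [Nilai2_cons_cons, if_pos hAmem1]
        by_cases hy : 0 < c1.getD (a2.getD j' 0) 0
        · have hymem : a2.getD j' 0 ∈ a1.getD i' 0 :: liveList s1' (a1.drop (i' + 1)) :=
            count_pos_mem c1 _ _ hc1x hy
          have hAmem2 : pyIsMember (a2.getD j' 0)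
              (a1.getD i' 0 :: liveList s1' (a1.drop (i' + 1))) = true :=
            (pyIsMember_iff _ _).mpr hymem
          rw [if_pos hy, if_pos hAmem2]
          by_cases hyx : a2.getD j' 0 = a1.getD i' 0
          · rw [if_pos hyx]
            rw [ih _ _ _ _ _ _ _ (by omega) hnn1' hnn2'
              (by rw [hyx]; exact counter_tail c1 _ _ hc1x)
              (counter_tail c2 _ _ hc2y)]
            rw [hyx]
            simp [pyRember]
          · rw [if_neg hyx]
            have hmem1 : a2.getD j' 0 ∈ liveList s1' (a1.drop i') := by
              rw [hhead1]; exact hymem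
            have hrem := liveList_rember s1' (a1.drop i') (a2.getD j' 0) hnn1' hmem1
            rw [ih _ _ _ _ _ _ _ (by omega)
              (by intro v; rw [PySem.Dict.getD_insert]; split_ifs
                  · have := hnn1' (a2.getD j' 0); omega
                  · exact hnn1' v)
              hnn2'
              (by rw [hrem, hhead1]
                  exact counter_rember c1 _ _ hc1x hymem)
              (counter_tail c2 _ _ hc2y)]
            rw [hrem, hhead1]
        · rw [if_neg hy]
          have hynmem := count_zero_not_mem c1 _ _ hc1x hy
          have hAnm2 : ¬ pyIsMember (a2.getD j' 0)
              (a1.getD i' 0 :: liveList s1' (a1.drop (i' + 1))) = true := by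
            rw [pyIsMember_iff]; exact hynmem
          rw [if_neg hAnm2]
          have hxney : a1.getD i' 0 ≠ a2.getD j' 0 := by
            intro he; exact hynmem (by rw [← he]; exact List.mem_cons_self)
          have hxT2 : a1.getD i' 0 ∈ liveList s2' (a2.drop (j' + 1)) := by
            rcases List.mem_cons.mp hxmem with he | hm
            · exact absurd he hxney
            · exact hm
          have hmem2 : a1.getD i' 0 ∈ liveList s2' (a2.drop (j' + 1)) := hxT2
          have hrem := liveList_rember s2' (a2.drop (j' + 1)) (a1.getD i' 0) hnn2' hmem2
          rw [ih _ _ _ _ _ _ _ (by omega) hnn1'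
            (by intro v; rw [PySem.Dict.getD_insert]; split_ifs
                · have := hnn2' (a1.getD i' 0); omega
                · exact hnn2' v)
            (counter_tail c1 _ _ hc1x)
            (by rw [hrem]
                exact counter_rember _ _ _ (counter_tail c2 _ _ hc2y) hxT2)]
          rw [hrem]
          ring
      · rw [if_neg hx]
        have hxnm := count_zero_not_mem c2 _ _ hc2' hx
        by_cases h2 : j' < a2.length
        · rw [dif_pos h2]
          have hy0 := pvSkipLoop_stop a2 s2 j (by rw [hq2]; exact h2)
          rw [hq2] at hy0
          dsimp only at hy0
          have hhead2 : liveList s2' (a2.drop j')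
              = a2.getD j' 0 :: liveList s2' (a2.drop (j' + 1)) :=
            liveList_head a2 s2' j' h2 hy0
          have hc2y : ∀ v, c2.getD v 0
              = (((a2.getD j' 0 :: liveList s2' (a2.drop (j' + 1))).count v : Int)) := by
            intro v; rw [hc2' v, hhead2]
          rw [hhead1, hhead2]
          have hAnm : ¬ pyIsMember (a1.getD i' 0)
              (a2.getD j' 0 :: liveList s2' (a2.drop (j' + 1))) = true := by
            rw [pyIsMember_iff]
            rw [hhead2] at hxnm
            exact hxnm
          rw [Nilai2_cons_cons, if_neg hAnm]
          rw [ih _ _ _ _ _ _ _ (by omega) hnn1' hnn2'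
            (counter_tail c1 _ _ hc1x)
            (counter_tail c2 _ _ hc2y)]
          ring
        · rw [dif_neg h2]
          have hdj : a2.drop j' = [] := List.drop_eq_nil_of_le (by omega)
          rw [hhead1, hdj, liveList, Nilai2_cons_nil]
          have hihres := ih (c1.insert (a1.getD i' 0) (c1.getD (a1.getD i' 0) 0 - 1)) c2
            s1' s2' (i' + 1) j' (score + 1) (by omega) hnn1' hnn2'
            (counter_tail c1 _ _ hc1x)
            (by intro v; rw [hc2' v])
          rw [hihres, hdj, liveList]
          ring
    · rw [dif_neg h1]
      have hdi : a1.drop i' = [] := List.drop_eq_nil_of_le (by omega)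
      rw [hdi, liveList, Nilai2_nil]
      ring

theorem init_counter (L : List Int) :
    ∀ v, (L.foldl (fun d v => d.insert v (d.getD v 0 + 1)) PySem.Dict.empty).getD v 0
      = ((L.count v : Int)) := by
  intro v
  rw [PySem.Dict.getD_foldl_insert_add_one, PySem.Dict.getD_empty]
  omega

-- ===== VERDICT (by name: the statement is the Claim_ definition above) =====
theorem Nilai2_spec : Claim_equal_Nilai2 := by
  intro S1 S2 _
  unfold Spec_Nilai2 Nilai2_alt
  have h := pvLoop_eq S1 S2 (S1.length + S2.length)
    (S1.foldl (fun d v => d.insert v (d.getD v 0 + 1)) PySem.Dict.empty)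
    (S2.foldl (fun d v => d.insert v (d.getD v 0 + 1)) PySem.Dict.empty)
    PySem.Dict.empty PySem.Dict.empty 0 0 0
    (by omega)
    (fun v => by rw [PySem.Dict.getD_empty])
    (fun v => by rw [PySem.Dict.getD_empty])
    (fun v => by rw [List.drop_zero, liveList_empty]; exact init_counter S1 v)
    (fun v => by rw [List.drop_zero, liveList_empty]; exact init_counter S2 v)
  simp only [List.drop_zero, liveList_empty] at h
  rw [h]
  ring
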